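-- pv_equiv track=rewrite | github.com/NoahL-B/EkmonSpaceTraders | main.py | get_ships_by_mounts
-- ===== SOURCE A (Python) =====
-- def get_ships_by_mounts(all_ships, desired_mounts_list=None, disallowed_mounts_list=None):
--     if desired_mounts_list is None:
--         desired_mounts_list = []
--     if disallowed_mounts_list is None:
--         disallowed_mounts_list = []
--
--     equipped_ships = []
--
--     for ship in all_ships:
--         equipment_list = ship["mounts"]
--         if len(desired_mounts_list) == 0:
--             equipped = True
--         else:
--             equipped = False
--         for mount in equipment_list:
--             if mount["symbol"] in desired_mounts_list:
--                 equipped = True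
--         for mount in equipment_list:
--             if mount["symbol"] in disallowed_mounts_list:
--                 equipped = False
--
--         if equipped:
--             equipped_ships.append(ship)
--     return equipped_ships
-- ===== SOURCE B (Python) =====
-- def get_ships_by_mounts(all_ships, desired_mounts_list=None, disallowed_mounts_list=None):
--     # Inverted index: mount symbol -> set of ship positions carrying it (one pass).
--     index = {}
--     for i, ship in enumerate(all_ships):
--         for mount in ship["mounts"]:
--             index.setdefault(mount["symbol"], set()).add(i)
--     # Keep-set of positions, computed per SYMBOL instead of per ship.
--     if desired_mounts_list:
--         keep = set()
--         for sym in desired_mounts_list: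
--             keep |= index.get(sym, set())
--     else:
--         keep = set(range(len(all_ships)))
--     for sym in disallowed_mounts_list or []:
--         keep -= index.get(sym, set())
--     return [ship for i, ship in enumerate(all_ships) if i in keep]
-- ===== Notes on version B (the rewrite author's own statement) =====
-- stated objective: alternative
-- what changed: Inverts the iteration: instead of scanning each ship's mounts against the two lists, B builds an inverted index from mount symbol to the set of ship positions, computes a keep-set of positions by set union over the desired symbols and set difference over the disallowed symbols, and emits the ships whose position survives.
import Mathlib
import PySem

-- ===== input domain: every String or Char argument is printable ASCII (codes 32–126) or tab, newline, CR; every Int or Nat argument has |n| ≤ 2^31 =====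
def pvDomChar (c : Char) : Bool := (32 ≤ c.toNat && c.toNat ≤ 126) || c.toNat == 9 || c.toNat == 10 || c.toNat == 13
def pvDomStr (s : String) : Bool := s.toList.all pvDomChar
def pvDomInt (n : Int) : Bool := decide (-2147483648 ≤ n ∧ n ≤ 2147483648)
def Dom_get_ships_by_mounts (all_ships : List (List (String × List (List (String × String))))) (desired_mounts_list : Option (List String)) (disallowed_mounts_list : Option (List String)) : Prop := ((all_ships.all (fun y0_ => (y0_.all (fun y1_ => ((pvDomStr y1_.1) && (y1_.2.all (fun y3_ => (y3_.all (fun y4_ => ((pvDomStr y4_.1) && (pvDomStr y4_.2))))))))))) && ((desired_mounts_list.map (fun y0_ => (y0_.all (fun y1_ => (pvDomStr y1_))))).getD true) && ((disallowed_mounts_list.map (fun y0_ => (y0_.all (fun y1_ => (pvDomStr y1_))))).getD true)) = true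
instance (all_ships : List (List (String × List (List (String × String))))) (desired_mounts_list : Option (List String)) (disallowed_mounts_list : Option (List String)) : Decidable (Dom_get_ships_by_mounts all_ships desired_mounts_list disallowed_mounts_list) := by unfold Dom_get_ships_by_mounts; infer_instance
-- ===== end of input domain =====

-- B replaces A's per-ship scans against the two lists by an inverted symbol→positions index and
-- set algebra on a keep-set of positions (objective: alternative algorithm, same result).

-- ===== PORT A =====
def pvMounts (ship : List (String × List (List (String × String)))) : List (List (String × String)) :=
  ((PySem.Dict.mk ship).get? "mounts").getD []

def pvSym (mount : List (String × String)) : String :=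
  ((PySem.Dict.mk mount).get? "symbol").getD ""

-- literal transliteration of A: per-ship boolean flag set by two separate scans over the mounts
def get_ships_by_mounts (all_ships : List (List (String × List (List (String × String))))) (desired_mounts_list : Option (List String)) (disallowed_mounts_list : Option (List String)) : List (List (String × List (List (String × String)))) :=
  let desired := desired_mounts_list.getD []
  let disallowed := disallowed_mounts_list.getD []
  all_ships.foldl (fun equipped_ships ship =>
    let equipment_list := pvMounts ship
    let equipped0 : Bool := decide (desired.length = 0)
    let equipped1 := equipment_list.foldl (fun equipped mount =>
      if desired.contains (pvSym mount) then true else equipped) equipped0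
    let equipped2 := equipment_list.foldl (fun equipped mount =>
      if disallowed.contains (pvSym mount) then false else equipped) equipped1
    if equipped2 then equipped_ships ++ [ship] else equipped_ships) []

-- ===== PORT B =====
-- B: inverted index symbol → set of ship positions; keep-set built per symbol; emit surviving positions
def get_ships_by_mounts_alt (all_ships : List (List (String × List (List (String × String))))) (desired_mounts_list : Option (List String)) (disallowed_mounts_list : Option (List String)) : List (List (String × List (List (String × String)))) :=
  let index : PySem.Dict String (PySem.Set Int) :=
    (PySem.List.enumerate all_ships).foldl (fun idx p =>
      (pvMounts p.2).foldl (fun idx mount =>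
        idx.insert (pvSym mount) (PySem.Set.add (idx.getD (pvSym mount) PySem.Set.empty) p.1)) idx)
      PySem.Dict.empty
  let keep : PySem.Set Int :=
    if !(desired_mounts_list.getD []).isEmpty then
      (desired_mounts_list.getD []).foldl
        (fun k sym => PySem.Set.union k (index.getD sym PySem.Set.empty)) PySem.Set.empty
    else
      PySem.Set.ofList (PySem.List.pyRange 0 (all_ships.length : Int) 1)
  let keep2 : PySem.Set Int := (disallowed_mounts_list.getD []).foldl
    (fun k sym => PySem.Set.diff k (index.getD sym PySem.Set.empty)) keep
  ((PySem.List.enumerate all_ships).filter (fun p => PySem.Set.contains keep2 p.1)).map (·.2)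

-- ===== PRECONDITION & SPEC =====
-- Pre_ excludes exactly the inputs where Python raises KeyError: a ship without a "mounts" key or a mount without a "symbol" key.
def Pre_get_ships_by_mounts (all_ships : List (List (String × List (List (String × String))))) (desired_mounts_list : Option (List String)) (disallowed_mounts_list : Option (List String)) : Prop :=
  ∀ ship ∈ all_ships, ((PySem.Dict.mk ship).get? "mounts").isSome ∧
    ∀ mount ∈ ((PySem.Dict.mk ship).get? "mounts").getD [], ((PySem.Dict.mk mount).get? "symbol").isSome
instance (all_ships : List (List (String × List (List (String × String))))) (desired_mounts_list : Option (List String)) (disallowed_mounts_list : Option (List String)) : Decidable (Pre_get_ships_by_mounts all_ships desired_mounts_list disallowed_mounts_list) := by unfold Pre_get_ships_by_mounts; infer_instance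
def pvWitness_get_ships_by_mounts : (List (List (String × List (List (String × String))))) × Option (List String) × Option (List String) :=
  ([[("mounts", [[("symbol", "GUN")]])]], some ["GUN"], none)

def Spec_get_ships_by_mounts (all_ships : List (List (String × List (List (String × String))))) (desired_mounts_list : Option (List String)) (disallowed_mounts_list : Option (List String)) (out : List (List (String × List (List (String × String))))) : Prop := out = get_ships_by_mounts_alt all_ships desired_mounts_list disallowed_mounts_list
instance (all_ships : List (List (String × List (List (String × String))))) (desired_mounts_list : Option (List String)) (disallowed_mounts_list : Option (List String)) (out : List (List (String × List (List (String × String))))) : Decidable (Spec_get_ships_by_mounts all_ships desired_mounts_list disallowed_mounts_list out) := by unfold Spec_get_ships_by_mounts; infer_instance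

-- ===== CLAIM =====
def Claim_equal_get_ships_by_mounts : Prop := ∀ (all_ships : List (List (String × List (List (String × String))))) (desired_mounts_list : Option (List String)) (disallowed_mounts_list : Option (List String)), Dom_get_ships_by_mounts all_ships desired_mounts_list disallowed_mounts_list → Pre_get_ships_by_mounts all_ships desired_mounts_list disallowed_mounts_list → Spec_get_ships_by_mounts all_ships desired_mounts_list disallowed_mounts_list (get_ships_by_mounts all_ships desired_mounts_list disallowed_mounts_list)

-- ===== LEMMAS AND PROOFS =====

-- A's two flag loops are "or over desired hits" and "and-not over disallowed hits"
theorem pv_foldl_or (C : List (String × String) → Bool) (el : List (List (String × String))) (b : Bool) :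
    el.foldl (fun e m => if C m then true else e) b = (b || el.any C) := by
  induction el generalizing b with
  | nil => simp
  | cons a t ih =>
    rw [List.foldl_cons]
    by_cases h : C a = true
    · rw [if_pos h, ih]; simp [h]
    · rw [if_neg h, ih]; simp only [Bool.not_eq_true] at h; simp [h]

theorem pv_foldl_andnot (C : List (String × String) → Bool) (el : List (List (String × String))) (b : Bool) :
    el.foldl (fun e m => if C m then false else e) b = (b && !(el.any C)) := by
  induction el generalizing b with
  | nil => simp
  | cons a t ih =>
    rw [List.foldl_cons]
    by_cases h : C a = true
    · rw [if_pos h, ih]; simp [h]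
    · rw [if_neg h, ih]; simp only [Bool.not_eq_true] at h; simp [h]

-- inner index-building loop over one ship's mounts: membership characterisation
theorem pv_inner_getD (el : List (List (String × String))) (i : Int)
    (d : PySem.Dict String (PySem.Set Int)) (sym : String) (j : Int) :
    j ∈ (el.foldl (fun idx mount =>
        idx.insert (pvSym mount) (PySem.Set.add (idx.getD (pvSym mount) PySem.Set.empty) i)) d).getD sym PySem.Set.empty
      ↔ j ∈ d.getD sym PySem.Set.empty ∨ (j = i ∧ ∃ m ∈ el, pvSym m = sym) := by
  induction el generalizing d with
  | nil => simp [PySem.Set.empty]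
  | cons m t ih =>
    rw [List.foldl_cons, ih]
    rw [PySem.Dict.getD_insert]
    by_cases h : sym = pvSym m
    · subst h
      rw [if_pos rfl, PySem.Set.mem_add]
      constructor
      · rintro (h1 | h2)
        · rcases h1 with h1 | h1
          · exact Or.inl h1
          · exact Or.inr ⟨h1, m, List.mem_cons_self, rfl⟩
        · exact Or.inr ⟨h2.1, by rcases h2.2 with ⟨m', hm', hs⟩; exact ⟨m', List.mem_cons_of_mem _ hm', hs⟩⟩
      · rintro (h1 | ⟨hj, m', _, _⟩)
        · exact Or.inl (Or.inl h1)
        · exact Or.inl (Or.inr hj)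
    · rw [if_neg h]
      constructor
      · rintro (h1 | h2)
        · exact Or.inl h1
        · exact Or.inr ⟨h2.1, by rcases h2.2 with ⟨m', hm', hs⟩; exact ⟨m', List.mem_cons_of_mem _ hm', hs⟩⟩
      · rintro (h1 | ⟨hj, m', hm', hs⟩)
        · exact Or.inl h1
        · rcases List.mem_cons.mp hm' with rfl | hm'
          · exact absurd hs.symm h
          · exact Or.inr ⟨hj, m', hm', hs⟩

-- the whole index: position j is in index[sym] iff some enumerated ship at position j carries sym
theorem pv_index_getD (l : List (Int × List (String × List (List (String × String)))))
    (d : PySem.Dict String (PySem.Set Int)) (sym : String) (j : Int) :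
    j ∈ (l.foldl (fun idx p =>
        (pvMounts p.2).foldl (fun idx mount =>
          idx.insert (pvSym mount) (PySem.Set.add (idx.getD (pvSym mount) PySem.Set.empty) p.1)) idx) d).getD sym PySem.Set.empty
      ↔ j ∈ d.getD sym PySem.Set.empty ∨ ∃ p ∈ l, p.1 = j ∧ ∃ m ∈ pvMounts p.2, pvSym m = sym := by
  induction l generalizing d with
  | nil => simp
  | cons p t ih =>
    rw [List.foldl_cons, ih, pv_inner_getD]
    constructor
    · rintro (⟨h1 | ⟨hj, hm⟩⟩ | ⟨q, hq, hj, hm⟩)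
      · exact Or.inl h1
      · exact Or.inr ⟨p, List.mem_cons_self, hj.symm, hm⟩
      · exact Or.inr ⟨q, List.mem_cons_of_mem _ hq, hj, hm⟩
    · rintro (h1 | ⟨q, hq, hj, hm⟩)
      · exact Or.inl (Or.inl h1)
      · rcases List.mem_cons.mp hq with rfl | hq
        · exact Or.inl (Or.inr ⟨hj.symm, hm⟩)
        · exact Or.inr ⟨q, hq, hj, hm⟩

-- union loop over the desired symbols
theorem pv_union_fold (l : List String) (g : String → PySem.Set Int) (s : PySem.Set Int) (j : Int) :
    j ∈ l.foldl (fun k sym => PySem.Set.union k (g sym)) s ↔ j ∈ s ∨ ∃ sym ∈ l, j ∈ g sym := by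
  induction l generalizing s with
  | nil => simp
  | cons x t ih =>
    rw [List.foldl_cons, ih, PySem.Set.mem_union]
    constructor
    · rintro ((h | h) | ⟨sym, hs, hj⟩)
      · exact Or.inl h
      · exact Or.inr ⟨x, List.mem_cons_self, h⟩
      · exact Or.inr ⟨sym, List.mem_cons_of_mem _ hs, hj⟩
    · rintro (h | ⟨sym, hs, hj⟩)
      · exact Or.inl (Or.inl h)
      · rcases List.mem_cons.mp hs with rfl | hs
        · exact Or.inl (Or.inr hj)
        · exact Or.inr ⟨sym, hs, hj⟩

-- difference loop over the disallowed symbols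
theorem pv_diff_fold (l : List String) (g : String → PySem.Set Int) (s : PySem.Set Int) (j : Int) :
    j ∈ l.foldl (fun k sym => PySem.Set.diff k (g sym)) s ↔ j ∈ s ∧ ∀ sym ∈ l, j ∉ g sym := by
  induction l generalizing s with
  | nil => simp
  | cons x t ih =>
    rw [List.foldl_cons, ih, PySem.Set.mem_diff]
    constructor
    · rintro ⟨⟨hs, hx⟩, ht⟩
      refine ⟨hs, fun sym hsym => ?_⟩
      rcases List.mem_cons.mp hsym with rfl | h
      · exact hx
      · exact ht sym h
    · rintro ⟨hs, h⟩
      exact ⟨⟨hs, h x List.mem_cons_self⟩, fun sym hsym => h sym (List.mem_cons_of_mem _ hsym)⟩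

-- filter over an enumeration by an index predicate equals filter by the element predicate
theorem pv_enum_filter {α : Type} (xs : List α) (s : Int) (Q : Int → Bool) (P : α → Bool)
    (h : ∀ (k : Nat) (hk : k < xs.length), Q (s + k) = P xs[k]) :
    ((PySem.List.enumerate xs s).filter (fun p => Q p.1)).map (·.2) = xs.filter P := by
  induction xs generalizing s with
  | nil => simp [PySem.List.enumerate]
  | cons x t ih =>
    rw [PySem.List.enumerate_cons]
    have h0 : Q s = P x := by simpa using h 0 (by simp)
    have ht : ∀ (k : Nat) (hk : k < t.length), Q (s + 1 + k) = P t[k] := by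
      intro k hk
      have hh := h (k + 1) (by simpa using Nat.succ_lt_succ hk)
      have e : s + ((k + 1 : Nat) : Int) = s + 1 + (k : Int) := by push_cast; ring
      rw [e, List.getElem_cons_succ] at hh
      exact hh
    cases hx : P x with
    | true =>
      rw [List.filter_cons_of_pos (by simpa [h0] using hx), List.filter_cons_of_pos hx,
        List.map_cons, ih (s + 1) ht]
    | false =>
      rw [List.filter_cons_of_neg (by simp [h0, hx]), List.filter_cons_of_neg (by simp [hx]),
        ih (s + 1) ht]

-- ===== VERDICT =====
theorem get_ships_by_mounts_spec : Claim_equal_get_ships_by_mounts := by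
  intro all_ships desired_mounts_list disallowed_mounts_list _ _
  unfold Spec_get_ships_by_mounts
  simp only [get_ships_by_mounts, get_ships_by_mounts_alt]
  rw [PySem.List.foldl_append_if_eq_filter, List.nil_append]
  refine Eq.symm (pv_enum_filter _ _ _ _ ?_)
  intro k hk
  rw [pv_foldl_or, pv_foldl_andnot, Bool.eq_iff_iff, PySem.Set.contains_iff, pv_diff_fold]
  have hIdx : ∀ sym : String,
      ((0:Int) + (k:Int)) ∈ ((PySem.List.enumerate all_ships).foldl (fun idx p =>
        (pvMounts p.2).foldl (fun idx mount =>
          idx.insert (pvSym mount) (PySem.Set.add (idx.getD (pvSym mount) PySem.Set.empty) p.1)) idx)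
        PySem.Dict.empty).getD sym PySem.Set.empty
      ↔ ∃ m ∈ pvMounts all_ships[k], pvSym m = sym := by
    intro sym
    rw [pv_index_getD]
    constructor
    · rintro (h | ⟨p, hp, hj, hm⟩)
      · simp [PySem.Dict.empty, PySem.Dict.getD, PySem.Dict.get?, PySem.Set.empty] at h
      · rcases (PySem.List.mem_enumerate_iff _ _ _).mp hp with ⟨k', hk', rfl⟩
        simp only at hj hm
        have : k' = k := by omega
        subst this; exact hm
    · intro hm
      exact Or.inr ⟨((0:Int) + k, all_ships[k]),
        (PySem.List.mem_enumerate_iff _ _ _).mpr ⟨k, hk, rfl⟩, rfl, hm⟩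
  by_cases hdes : desired_mounts_list.getD [] = []
  · rw [if_neg (by simp [hdes]), hdes]
    simp only [PySem.Set.mem_ofList, PySem.List.mem_pyRange_one, List.length_nil, decide_true,
      Bool.true_or, Bool.true_and, Bool.not_eq_true', List.any_eq_false,
      List.contains_iff_mem]
    constructor
    · rintro ⟨-, hno⟩ m hm hmem
      exact hno _ hmem ((hIdx _).mpr ⟨m, hm, rfl⟩)
    · intro hno
      refine ⟨⟨by omega, by omega⟩, fun sym hsym hin => ?_⟩
      rcases (hIdx sym).mp hin with ⟨m, hm, rfl⟩
      exact hno m hm hsym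
  · rw [if_pos (by simp [hdes])]
    rw [pv_union_fold]
    simp only [PySem.Set.empty, List.not_mem_nil, false_or, Bool.and_eq_true,
      Bool.or_eq_true, decide_eq_true_eq, List.length_eq_zero_iff, hdes, false_or,
      List.any_eq_true, Bool.not_eq_true', List.any_eq_false, List.contains_iff_mem]
    constructor
    · rintro ⟨⟨sym, hsym, hin⟩, hno⟩
      rcases (hIdx sym).mp hin with ⟨m, hm, rfl⟩
      refine ⟨⟨m, hm, by simpa using hsym⟩,
        fun m2 hm2 hmem => hno _ hmem ((hIdx _).mpr ⟨m2, hm2, rfl⟩)⟩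
    · rintro ⟨⟨m, hm, hd⟩, hno⟩
      refine ⟨⟨pvSym m, by simpa using hd, (hIdx _).mpr ⟨m, hm, rfl⟩⟩, fun sym hsym hin => ?_⟩
      rcases (hIdx sym).mp hin with ⟨m2, hm2, rfl⟩
      exact hno m2 hm2 hsym
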